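-- pv_equiv track=rewrite | github.com/humanendpoint/gick | src/build.py | construct_diff_msg
-- ===== SOURCE A (Python) =====
-- def construct_diff_msg(payload):
--     lines = payload.split("\n")
--     formatted_diff = ""
--     current_file = None
--     for line in lines:
--         if line.startswith("diff --git"):
--             if current_file:
--                 formatted_diff += "```\n"
--             filename = line.split(" b/")[-1]
--             formatted_diff += f"Diff for file: {filename}\n```\n"
--             current_file = filename
--             continue
--         if current_file:
--             if line.startswith("+++ ") or line.startswith("--- "):
--                 continue
--             elif (
--                 line.startswith("index ")
--                 or line.startswith("new file ")
--                 or line.startswith("deleted file ")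
--             ):
--                 continue
--             elif line.startswith(" ") or line.startswith("+") or line.startswith("-"):
--                 if line.startswith(" "):
--                     formatted_diff += f"  {line.strip()}\n"
--                 elif line.startswith("+"):
--                     formatted_diff += f"+ {line.strip()}\n"
--                 elif line.startswith("-"):
--                     formatted_diff += f"- {line.strip()}\n"
--     if current_file:
--         formatted_diff += "```\n"
--     return formatted_diff
-- ===== SOURCE B (Python) =====
-- def format_block(block):
--     filename = block[0].split(" b/")[-1]
--     out = "Diff for file: %s\n```\n" % filename
--     for line in block[1:]:
--         if line.startswith(("+++ ", "--- ", "index ", "new file ", "deleted file ")):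
--             continue
--         if line.startswith(" "):
--             out += "  %s\n" % line.strip()
--         elif line.startswith("+"):
--             out += "+ %s\n" % line.strip()
--         elif line.startswith("-"):
--             out += "- %s\n" % line.strip()
--     return out + "```\n"
--
--
-- def construct_diff_msg(payload):
--     blocks = []
--     for line in payload.split("\n"):
--         if line.startswith("diff --git"):
--             blocks.append([line])
--         elif blocks:
--             blocks[-1].append(line)
--     out = ""
--     for b in blocks:
--         out += format_block(b)
--     return out
-- ===== Notes on version B (the rewrite author's own statement) =====
-- stated objective: alternative
-- what changed: B first groups the lines into per-file blocks (new block at each 'diff --git' header, pre-header lines discarded) and then formats each block independently with a separate helper, replacing A's single stateful pass that threads a current_file flag and fence state through every line.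
-- intended difference: On payloads containing a 'diff --git' header whose ' b/' filename field is empty, A returns markdown with an unterminated code fence and silently drops that block's body (the falsy current_file '' disables all later processing), while B closes every block's fence and formats its body normally; B's balanced-fence output is the intended markdown. — e.g. on construct_diff_msg("diff --git a/x b/"): A returns "Diff for file: \n```\n", B returns "Diff for file: \n```\n```\n"
import Mathlib
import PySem

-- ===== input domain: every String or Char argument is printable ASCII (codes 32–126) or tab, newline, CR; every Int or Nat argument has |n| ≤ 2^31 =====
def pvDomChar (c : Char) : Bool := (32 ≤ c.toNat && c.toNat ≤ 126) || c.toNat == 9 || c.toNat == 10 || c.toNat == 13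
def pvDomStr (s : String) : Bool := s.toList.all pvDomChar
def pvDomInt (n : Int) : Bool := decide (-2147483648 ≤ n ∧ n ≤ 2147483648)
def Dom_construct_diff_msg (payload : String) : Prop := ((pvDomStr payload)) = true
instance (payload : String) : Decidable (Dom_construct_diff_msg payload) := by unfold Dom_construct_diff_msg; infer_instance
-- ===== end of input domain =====

-- B reformats the diff by a different decomposition (group lines into per-file blocks, then format each
-- block independently and concatenate) instead of A's single stateful pass; objective: alternative.
-- On headers with an empty " b/" filename field B closes the block's code fence and formats its body,
-- where A leaves the fence unterminated (see D_ below).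

-- ===== PORT A =====
-- Python truthiness of A's `current_file` (None or a str)
def pvTruthyA (cur : Option String) : Bool :=
  match cur with
  | none => false
  | some s => !(s == "")

-- the body of A's `for line in lines` loop, state = (formatted_diff, current_file)
def pvStepA (st : String × Option String) (line : String) : String × Option String :=
  if PySem.Str.startswith line "diff --git" then
    let fd := if pvTruthyA st.2 then st.1 ++ "```\n" else st.1
    let filename := ((PySem.Str.split? line " b/").getD []).getLast!
    (fd ++ "Diff for file: " ++ filename ++ "\n```\n", some filename)
  else if pvTruthyA st.2 then
    if PySem.Str.startswith line "+++ " || PySem.Str.startswith line "--- " then st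
    else if PySem.Str.startswith line "index " || PySem.Str.startswith line "new file " ||
            PySem.Str.startswith line "deleted file " then st
    else if PySem.Str.startswith line " " || PySem.Str.startswith line "+" ||
            PySem.Str.startswith line "-" then
      if PySem.Str.startswith line " " then (st.1 ++ "  " ++ PySem.Str.strip line ++ "\n", st.2)
      else if PySem.Str.startswith line "+" then (st.1 ++ "+ " ++ PySem.Str.strip line ++ "\n", st.2)
      else if PySem.Str.startswith line "-" then (st.1 ++ "- " ++ PySem.Str.strip line ++ "\n", st.2)
      else st
    else st
  else st

-- A's trailing `if current_file: formatted_diff += "```\n"`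
def pvFinishA (st : String × Option String) : String :=
  if pvTruthyA st.2 then st.1 ++ "```\n" else st.1

def construct_diff_msg (payload : String) : String :=
  pvFinishA (((PySem.Str.split? payload "\n").getD []).foldl pvStepA ("", none))

-- ===== PORT B =====
-- Source B's format_block: header from block[0], prefix rules over block[1:], closing fence
def pvFormatBlock (block : List String) : String :=
  let filename := ((PySem.Str.split? block.head! " b/").getD []).getLast!
  let out := "Diff for file: " ++ filename ++ "\n```\n"
  let out := block.tail.foldl
    (fun out line =>
      if PySem.Str.startswith line "+++ " || PySem.Str.startswith line "--- " ||
         PySem.Str.startswith line "index " || PySem.Str.startswith line "new file " ||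
         PySem.Str.startswith line "deleted file " then out
      else if PySem.Str.startswith line " " then out ++ "  " ++ PySem.Str.strip line ++ "\n"
      else if PySem.Str.startswith line "+" then out ++ "+ " ++ PySem.Str.strip line ++ "\n"
      else if PySem.Str.startswith line "-" then out ++ "- " ++ PySem.Str.strip line ++ "\n"
      else out)
    out
  out ++ "```\n"

-- Source B's grouping loop: start a block at each header, else append to the last block (if any)
def pvGroupStep (bs : List (List String)) (line : String) : List (List String) :=
  if PySem.Str.startswith line "diff --git" then bs ++ [[line]]
  else if bs.isEmpty then bs
  else bs.dropLast ++ [bs.getLast! ++ [line]]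

def construct_diff_msg_alt (payload : String) : String :=
  let blocks := ((PySem.Str.split? payload "\n").getD []).foldl pvGroupStep []
  blocks.foldl (fun out b => out ++ pvFormatBlock b) ""

-- ===== PRECONDITION & SPEC =====
-- On payloads containing a "diff --git" header line whose " b/" filename field is empty, A returns
-- markdown with an unterminated code fence and drops that block's body (its falsy current_file "" disables
-- all later processing of the block), while B closes every block's fence and formats its body as usual;
-- B's is the intended output since the produced markdown must have balanced fences.
def D_construct_diff_msg (payload : String) : Prop :=
  ∃ l ∈ (PySem.Str.split? payload "\n").getD [],
    PySem.Str.startswith l "diff --git" = true ∧ ((PySem.Str.split? l " b/").getD []).getLast! = ""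
instance (payload : String) : Decidable (D_construct_diff_msg payload) := by
  unfold D_construct_diff_msg; infer_instance

def Spec_construct_diff_msg (payload : String) (out : String) : Prop :=
  ¬ D_construct_diff_msg payload → out = construct_diff_msg_alt payload
instance (payload : String) (out : String) : Decidable (Spec_construct_diff_msg payload out) := by
  unfold Spec_construct_diff_msg; infer_instance

def pvDiffWitness_construct_diff_msg : String := "diff --git a/x b/"
def pvDiffWitnessOut_construct_diff_msg : String × String :=
  ("Diff for file: \n```\n", "Diff for file: \n```\n```\n")

-- ===== CLAIM (what is proved, stated in full; the proofs are below) =====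
def Claim_unchanged_construct_diff_msg : Prop := ∀ (payload : String), Dom_construct_diff_msg payload → Spec_construct_diff_msg payload (construct_diff_msg payload)
def Claim_changed_construct_diff_msg : Prop := Dom_construct_diff_msg (pvDiffWitness_construct_diff_msg) ∧ D_construct_diff_msg (pvDiffWitness_construct_diff_msg) ∧ construct_diff_msg (pvDiffWitness_construct_diff_msg) = pvDiffWitnessOut_construct_diff_msg.1 ∧ construct_diff_msg_alt (pvDiffWitness_construct_diff_msg) = pvDiffWitnessOut_construct_diff_msg.2 ∧ pvDiffWitnessOut_construct_diff_msg.1 ≠ pvDiffWitnessOut_construct_diff_msg.2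

def Claim_exact_construct_diff_msg : Prop := ∀ (payload : String), Dom_construct_diff_msg payload → D_construct_diff_msg payload → construct_diff_msg payload ≠ construct_diff_msg_alt payload

-- ===== LEMMAS AND PROOFS =====

-- shared vocabulary for the proof
def pvIsHdr (l : String) : Bool := PySem.Str.startswith l "diff --git"
def pvFname (l : String) : String := ((PySem.Str.split? l " b/").getD []).getLast!
def pvHdrS (l : String) : String := "Diff for file: " ++ pvFname l ++ "\n```\n"

-- the common per-body-line formatting (empty string = skipped line)
def pvFmtL (line : String) : String :=
  if PySem.Str.startswith line "+++ " || PySem.Str.startswith line "--- " then ""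
  else if PySem.Str.startswith line "index " || PySem.Str.startswith line "new file " ||
          PySem.Str.startswith line "deleted file " then ""
  else if PySem.Str.startswith line " " then "  " ++ PySem.Str.strip line ++ "\n"
  else if PySem.Str.startswith line "+" then "+ " ++ PySem.Str.strip line ++ "\n"
  else if PySem.Str.startswith line "-" then "- " ++ PySem.Str.strip line ++ "\n"
  else ""

-- reference semantics: U ls = output of the tail of an open block followed by ls; S ls = output from closed state
def pvU : List String → String
  | [] => "```\n"
  | l :: ls => if pvIsHdr l then "```\n" ++ pvHdrS l ++ pvU ls else pvFmtL l ++ pvU ls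

def pvS : List String → String
  | [] => ""
  | l :: ls => if pvIsHdr l then pvHdrS l ++ pvU ls else pvS ls

def pvGood (ls : List String) : Prop := ∀ l ∈ ls, pvIsHdr l = true → pvFname l ≠ ""

def pvCat : List String → String
  | [] => ""
  | l :: ls => pvFmtL l ++ pvCat ls

theorem pvStepA_hdr (st : String × Option String) (l : String) (h : pvIsHdr l = true) :
    pvStepA st l = ((if pvTruthyA st.2 then st.1 ++ "```\n" else st.1) ++ pvHdrS l, some (pvFname l)) := by
  simp only [pvIsHdr] at h
  simp only [pvStepA]
  rw [if_pos h]
  simp [pvHdrS, pvFname, String.append_assoc]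

theorem pvStepA_body (acc f l : String) (hf : f ≠ "") (h : pvIsHdr l = false) :
    pvStepA (acc, some f) l = (acc ++ pvFmtL l, some f) := by
  simp only [pvIsHdr] at h
  have ht : pvTruthyA (some f) = true := by simp [pvTruthyA, hf]
  simp only [pvStepA]
  rw [if_neg (by rw [h]; simp), if_pos ht]
  unfold pvFmtL
  split_ifs <;> simp_all [String.append_assoc]

theorem pvA_open (ls : List String) : ∀ acc f, f ≠ "" → pvGood ls →
    pvFinishA (ls.foldl pvStepA (acc, some f)) = acc ++ pvU ls := by
  induction ls with
  | nil =>
    intro acc f hf _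
    simp [pvFinishA, pvTruthyA, hf, pvU]
  | cons l ls ih =>
    intro acc f hf hg
    have hg' : pvGood ls := fun x hx => hg x (List.mem_cons_of_mem _ hx)
    cases hh : pvIsHdr l with
    | true =>
      rw [List.foldl_cons, pvStepA_hdr _ _ hh]
      have ht : pvTruthyA (some f) = true := by simp [pvTruthyA, hf]
      rw [ht]
      simp only [if_true]
      rw [ih _ _ (hg l (List.mem_cons_self) hh) hg']
      simp [pvU, hh, String.append_assoc]
    | false =>
      rw [List.foldl_cons, pvStepA_body _ _ _ hf hh]
      rw [ih _ _ hf hg']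
      simp [pvU, hh, String.append_assoc]

theorem pvA_closed (ls : List String) : ∀ acc, pvGood ls →
    pvFinishA (ls.foldl pvStepA (acc, none)) = acc ++ pvS ls := by
  induction ls with
  | nil => intro acc _; simp [pvFinishA, pvTruthyA, pvS]
  | cons l ls ih =>
    intro acc hg
    have hg' : pvGood ls := fun x hx => hg x (List.mem_cons_of_mem _ hx)
    cases hh : pvIsHdr l with
    | true =>
      rw [List.foldl_cons, pvStepA_hdr _ _ hh]
      simp only [pvTruthyA, Bool.false_eq_true, if_false]
      rw [pvA_open ls _ _ (hg l (List.mem_cons_self) hh) hg']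
      simp [pvS, hh, String.append_assoc]
    | false =>
      have hh' := hh; simp only [pvIsHdr] at hh'
      have e : pvStepA (acc, none) l = (acc, none) := by
        simp only [pvStepA]
        rw [if_neg (by rw [hh']; simp)]
        simp [pvTruthyA]
      rw [List.foldl_cons, e, ih _ hg']
      simp [pvS, hh]

-- B side
def pvJF (bs : List (List String)) : String := bs.foldl (fun out b => out ++ pvFormatBlock b) ""

theorem pvJF_acc (bs : List (List String)) : ∀ acc, bs.foldl (fun out b => out ++ pvFormatBlock b) acc = acc ++ pvJF bs := by
  induction bs with
  | nil => intro acc; simp [pvJF]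
  | cons b bs ih =>
    intro acc
    rw [List.foldl_cons, ih]
    rw [show pvJF (b :: bs) = ("" ++ pvFormatBlock b) ++ pvJF bs from by rw [pvJF, List.foldl_cons, ih]]
    simp [String.append_assoc]

theorem pvJF_append (bs cs : List (List String)) : pvJF (bs ++ cs) = pvJF bs ++ pvJF cs := by
  rw [pvJF, List.foldl_append, pvJF_acc]
  rfl

theorem pvFmt_fold (body : List String) : ∀ out, body.foldl
    (fun out line =>
      if PySem.Str.startswith line "+++ " || PySem.Str.startswith line "--- " ||
         PySem.Str.startswith line "index " || PySem.Str.startswith line "new file " ||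
         PySem.Str.startswith line "deleted file " then out
      else if PySem.Str.startswith line " " then out ++ "  " ++ PySem.Str.strip line ++ "\n"
      else if PySem.Str.startswith line "+" then out ++ "+ " ++ PySem.Str.strip line ++ "\n"
      else if PySem.Str.startswith line "-" then out ++ "- " ++ PySem.Str.strip line ++ "\n"
      else out) out = out ++ pvCat body := by
  induction body with
  | nil => intro out; simp [pvCat]
  | cons l ls ih =>
    intro out
    rw [List.foldl_cons, ih]
    have e : (if PySem.Str.startswith l "+++ " || PySem.Str.startswith l "--- " ||
         PySem.Str.startswith l "index " || PySem.Str.startswith l "new file " ||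
         PySem.Str.startswith l "deleted file " then out
      else if PySem.Str.startswith l " " then out ++ "  " ++ PySem.Str.strip l ++ "\n"
      else if PySem.Str.startswith l "+" then out ++ "+ " ++ PySem.Str.strip l ++ "\n"
      else if PySem.Str.startswith l "-" then out ++ "- " ++ PySem.Str.strip l ++ "\n"
      else out) = out ++ pvFmtL l := by
      unfold pvFmtL
      split_ifs <;> simp_all [String.append_assoc]
    rw [e, pvCat, String.append_assoc]

theorem pvFormatBlock_eq (h : String) (body : List String) :
    pvFormatBlock (h :: body) = pvHdrS h ++ pvCat body ++ "```\n" := by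
  simp only [pvFormatBlock, List.head!, List.tail]
  rw [pvFmt_fold]
  simp [pvHdrS, pvFname, String.append_assoc]

theorem pvCat_concat (body : List String) (l : String) : pvCat (body ++ [l]) = pvCat body ++ pvFmtL l := by
  induction body with
  | nil => simp [pvCat]
  | cons x xs ih => simp [pvCat, ih, String.append_assoc]

theorem pvGroupStep_hdr (bs : List (List String)) (l : String) (h : pvIsHdr l = true) :
    pvGroupStep bs l = bs ++ [[l]] := by
  simp only [pvIsHdr] at h
  simp only [pvGroupStep]
  rw [if_pos h]

theorem pvGroupStep_body (bs : List (List String)) (b : List String) (l : String) (h : pvIsHdr l = false) :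
    pvGroupStep (bs ++ [b]) l = bs ++ [b ++ [l]] := by
  simp only [pvIsHdr] at h
  simp only [pvGroupStep]
  rw [if_neg (by rw [h]; simp), if_neg (by simp)]
  rw [List.dropLast_concat]
  congr 1
  rw [List.getLast!_eq_getLast?_getD]
  simp

theorem pvGroup_loc (ls : List String) : ∀ (bs : List (List String)) (b : List String),
    ls.foldl pvGroupStep (bs ++ [b]) = bs ++ ls.foldl pvGroupStep [b] := by
  induction ls with
  | nil => intro bs b; simp
  | cons l ls ih =>
    intro bs b
    rw [List.foldl_cons, List.foldl_cons]
    cases hh : pvIsHdr l with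
    | true =>
      rw [pvGroupStep_hdr _ _ hh, pvGroupStep_hdr [b] _ hh]
      rw [ih (bs ++ [b]) [l]]
      rw [show ([b] ++ [[l]] : List (List String)) = [b] ++ [[l]] from rfl]
      rw [ih [b] [l]]
      simp
    | false =>
      have e1 : pvGroupStep (bs ++ [b]) l = bs ++ [b ++ [l]] := pvGroupStep_body bs b l hh
      have e2 : pvGroupStep [b] l = [b ++ [l]] := by simpa using pvGroupStep_body [] b l hh
      rw [e1, e2, ih bs (b ++ [l])]

theorem pvB_open (ls : List String) : ∀ (h : String) (body : List String),
    pvJF (ls.foldl pvGroupStep [h :: body]) = pvHdrS h ++ pvCat body ++ pvU ls := by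
  induction ls with
  | nil =>
    intro h body
    simp [pvJF, pvFormatBlock_eq, pvU, String.append_assoc]
  | cons l ls ih =>
    intro h body
    rw [List.foldl_cons]
    cases hh : pvIsHdr l with
    | true =>
      rw [pvGroupStep_hdr _ _ hh, pvGroup_loc, pvJF_append, ih l []]
      simp [pvJF, pvFormatBlock_eq, pvU, hh, pvCat, String.append_assoc]
    | false =>
      have e : pvGroupStep [h :: body] l = [h :: (body ++ [l])] := by
        simpa using pvGroupStep_body [] (h :: body) l hh
      rw [e, ih h (body ++ [l]), pvCat_concat]
      simp [pvU, hh, String.append_assoc]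

theorem pvB_closed (ls : List String) : pvJF (ls.foldl pvGroupStep []) = pvS ls := by
  induction ls with
  | nil => simp [pvJF, pvS]
  | cons l ls ih =>
    rw [List.foldl_cons]
    cases hh : pvIsHdr l with
    | true =>
      rw [pvGroupStep_hdr _ _ hh, List.nil_append, pvB_open ls l []]
      simp [pvS, hh, pvCat]
    | false =>
      have hh' := hh; simp only [pvIsHdr] at hh'
      have e : pvGroupStep [] l = [] := by
        simp only [pvGroupStep]
        rw [if_neg (by rw [hh']; simp)]
        simp
      rw [e, ih]
      simp [pvS, hh]


-- A's semantics WITHOUT the good-filename assumption: an empty filename makes current_file falsy,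
-- which behaves exactly like the initial state (no fence closing, body lines dropped)
mutual
def pvSA : List String → String
  | [] => ""
  | l :: ls => if pvIsHdr l then pvHdrS l ++ (if pvFname l == "" then pvSA ls else pvUA ls) else pvSA ls
def pvUA : List String → String
  | [] => "```\n"
  | l :: ls => if pvIsHdr l then "```\n" ++ pvHdrS l ++ (if pvFname l == "" then pvSA ls else pvUA ls)
               else pvFmtL l ++ pvUA ls
end

theorem pvStepA_skip (acc : String) (cur : Option String) (l : String)
    (hc : pvTruthyA cur = false) (h : pvIsHdr l = false) :
    pvStepA (acc, cur) l = (acc, cur) := by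
  simp only [pvIsHdr] at h
  simp only [pvStepA]
  rw [if_neg (by rw [h]; simp)]
  simp [hc]

theorem pvA_gen (ls : List String) : ∀ acc : String,
    (∀ f, f ≠ "" → pvFinishA (ls.foldl pvStepA (acc, some f)) = acc ++ pvUA ls) ∧
    (∀ cur, pvTruthyA cur = false → pvFinishA (ls.foldl pvStepA (acc, cur)) = acc ++ pvSA ls) := by
  induction ls with
  | nil =>
    intro acc
    constructor
    · intro f hf; simp [pvFinishA, pvTruthyA, hf, pvUA]
    · intro cur hc; simp [pvFinishA, hc, pvSA]
  | cons l ls ih =>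
    intro acc
    constructor
    · intro f hf
      cases hh : pvIsHdr l with
      | true =>
        rw [List.foldl_cons, pvStepA_hdr _ _ hh]
        have ht : pvTruthyA (some f) = true := by simp [pvTruthyA, hf]
        rw [ht]
        simp only [if_true]
        by_cases hf2 : pvFname l = ""
        · have hc : pvTruthyA (some (pvFname l)) = false := by simp [pvTruthyA, hf2]
          rw [show (some (pvFname l)) = (some (pvFname l)) from rfl]
          rw [(ih _).2 _ hc]
          simp [pvUA, hh, hf2, String.append_assoc]
        · rw [(ih _).1 _ hf2]
          simp [pvUA, hh, hf2, String.append_assoc]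
      | false =>
        rw [List.foldl_cons, pvStepA_body _ _ _ hf hh, (ih _).1 _ hf]
        simp [pvUA, hh, String.append_assoc]
    · intro cur hc
      cases hh : pvIsHdr l with
      | true =>
        rw [List.foldl_cons, pvStepA_hdr _ _ hh, hc]
        simp only [Bool.false_eq_true, if_false]
        by_cases hf2 : pvFname l = ""
        · have hc2 : pvTruthyA (some (pvFname l)) = false := by simp [pvTruthyA, hf2]
          rw [(ih _).2 _ hc2]
          simp [pvSA, hh, hf2, String.append_assoc]
        · rw [(ih _).1 _ hf2]
          simp [pvSA, hh, hf2, String.append_assoc]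
      | false =>
        rw [List.foldl_cons, pvStepA_skip _ _ _ hc hh, (ih _).2 _ hc]
        simp [pvSA, hh]

def pvBad (ls : List String) : Prop := ∃ l ∈ ls, pvIsHdr l = true ∧ pvFname l = ""

theorem pvLen3 (ls : List String) :
    (pvSA ls).length ≤ (pvS ls).length ∧ (pvUA ls).length ≤ (pvU ls).length ∧
    (pvSA ls).length < (pvU ls).length := by
  induction ls with
  | nil =>
    refine ⟨by simp [pvSA, pvS], by simp [pvUA, pvU], ?_⟩
    show ("" : String).length < "```\n".length
    decide
  | cons l ls ih =>
    obtain ⟨ih1, ih2, ih3⟩ := ih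
    have h4 : ("```\n" : String).length = 4 := by decide
    cases hh : pvIsHdr l with
    | true =>
      by_cases hf : pvFname l = ""
      · simp only [pvSA, pvUA, pvS, pvU, hh, hf, if_true, beq_self_eq_true, String.length_append]
        omega
      · have hf' : (pvFname l == "") = false := by simp [hf]
        simp only [pvSA, pvUA, pvS, pvU, hh, hf', if_true, Bool.false_eq_true, if_false, String.length_append]
        omega
    | false =>
      simp only [pvSA, pvUA, pvS, pvU, hh, if_false, String.length_append, Bool.false_eq_true]
      omega

theorem pvLenBad (ls : List String) (h : pvBad ls) :
    (pvSA ls).length < (pvS ls).length ∧ (pvUA ls).length < (pvU ls).length := by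
  induction ls with
  | nil => exact absurd h (by simp [pvBad])
  | cons l ls ih =>
    have h4 : ("```\n" : String).length = 4 := by decide
    obtain ⟨x, hx, hxh, hxf⟩ := h
    rcases List.mem_cons.mp hx with rfl | hx'
    · have h3 := (pvLen3 ls).2.2
      simp only [pvSA, pvUA, pvS, pvU, hxh, hxf, if_true, beq_self_eq_true, String.length_append]
      omega
    · obtain ⟨ih1, ih2⟩ := ih ⟨x, hx', hxh, hxf⟩
      cases hh : pvIsHdr l with
      | true =>
        by_cases hf : pvFname l = ""
        · have h3 := (pvLen3 ls).2.2
          simp only [pvSA, pvUA, pvS, pvU, hh, hf, if_true, beq_self_eq_true, String.length_append]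
          omega
        · have hf' : (pvFname l == "") = false := by simp [hf]
          simp only [pvSA, pvUA, pvS, pvU, hh, hf', if_true, Bool.false_eq_true, if_false, String.length_append]
          omega
      | false =>
        simp only [pvSA, pvUA, pvS, pvU, hh, if_false, String.length_append, Bool.false_eq_true]
        omega

-- ===== VERDICT (by name: the statement is the Claim_ definition above) =====
theorem construct_diff_msg_spec : Claim_unchanged_construct_diff_msg := by
  intro payload _ hD
  have hg : pvGood ((PySem.Str.split? payload "\n").getD []) := by
    intro l hl hhdr hempty
    exact hD ⟨l, hl, by simpa [pvIsHdr] using hhdr, by simpa [pvFname] using hempty⟩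
  have ha : construct_diff_msg payload =
      pvFinishA (((PySem.Str.split? payload "\n").getD []).foldl pvStepA ("", none)) := rfl
  have hb : construct_diff_msg_alt payload =
      pvJF (((PySem.Str.split? payload "\n").getD []).foldl pvGroupStep []) := rfl
  rw [ha, hb, pvA_closed _ _ hg, pvB_closed]
  simp

theorem construct_diff_msg_changed : Claim_changed_construct_diff_msg := by
  unfold Claim_changed_construct_diff_msg; decide

theorem construct_diff_msg_tight : Claim_exact_construct_diff_msg := by
  intro payload _ hD heq
  set ls := (PySem.Str.split? payload "\n").getD [] with hls
  have hbad : pvBad ls := by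
    obtain ⟨l, hl, h1, h2⟩ := hD
    exact ⟨l, hl, by simpa [pvIsHdr] using h1, by simpa [pvFname] using h2⟩
  have ha : construct_diff_msg payload = pvFinishA (ls.foldl pvStepA ("", none)) := rfl
  have ha2 : construct_diff_msg payload = pvSA ls := by
    rw [ha, (pvA_gen ls "").2 none (by simp [pvTruthyA])]
    simp
  have hb : construct_diff_msg_alt payload = pvS ls := by
    rw [show construct_diff_msg_alt payload = pvJF (ls.foldl pvGroupStep []) from rfl, pvB_closed]
  rw [ha2, hb] at heq
  have := (pvLenBad ls hbad).1
  rw [heq] at this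
  omega
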